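-- pv_equiv track=rewrite | github.com/impcds/challenges | strings/strings_1364.py | procura_emoji
-- ===== SOURCE A (Python) =====
-- def procura_emoji(emojis, frase):
--     menor = len(frase)
--     alterar = False
--     remover = ''
--     for emoji in emojis:
--         indice = frase.find(emoji)
--         if indice < menor and indice > -1:
--             menor = indice
--             remover = emoji
--             alterar = True
--     return emojis, alterar, remover
-- ===== SOURCE B (Python) =====
-- def procura_emoji(emojis, frase):
--     # Scan positions left to right; the first position where any emoji starts
--     # is the minimal first-occurrence index, and the first emoji matching
--     # there is exactly A's tie-break (first in list order with minimal find).
--     for i in range(len(frase)):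
--         for emoji in emojis:
--             if frase.startswith(emoji, i):
--                 return emojis, True, emoji
--     return emojis, False, ''
-- ===== Notes on version B (the rewrite author's own statement) =====
-- stated objective: alternative
-- what changed: B scans positions of the phrase left to right and returns at the first position where any pattern starts (early exit), instead of A's per-pattern str.find pass with a running strict minimum.
import Mathlib
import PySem

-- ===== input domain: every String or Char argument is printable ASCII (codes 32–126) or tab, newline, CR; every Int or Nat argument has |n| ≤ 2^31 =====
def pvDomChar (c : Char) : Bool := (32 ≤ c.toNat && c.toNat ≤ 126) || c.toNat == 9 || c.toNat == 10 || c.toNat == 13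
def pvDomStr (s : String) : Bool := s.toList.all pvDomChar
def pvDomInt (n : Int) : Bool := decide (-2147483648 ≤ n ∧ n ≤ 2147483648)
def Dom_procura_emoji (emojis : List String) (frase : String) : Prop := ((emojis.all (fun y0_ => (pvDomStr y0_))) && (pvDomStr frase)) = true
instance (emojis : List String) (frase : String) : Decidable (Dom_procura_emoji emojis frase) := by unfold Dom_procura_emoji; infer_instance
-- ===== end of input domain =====

-- B scans positions left to right with early exit instead of A's per-pattern
-- str.find pass with a running strict minimum (objective: alternative algorithm).

-- ===== PORT A =====
-- loop state: (menor, alterar, remover)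
def procura_emoji (emojis : List String) (frase : String) : List String × Bool × String :=
  let st := emojis.foldl (fun (st : Int × Bool × String) emoji =>
      let indice := PySem.Str.find frase emoji
      if indice < st.1 ∧ indice > -1 then (indice, true, emoji) else st)
    ((frase.toList.length : Int), false, "")
  (emojis, st.2.1, st.2.2)

-- ===== PORT B =====
-- inner 'for emoji in emojis: if frase.startswith(emoji, i): return' = find?;
-- outer 'for i in range(len(frase))' = recursion on the remaining fuel.
def pvScan (emojis : List String) (s : List Char) : Nat → Nat → Bool × String
  | _, 0 => (false, "")
  | i, fuel + 1 =>
    match emojis.find? (fun e => PySem.Chars.startswith (s.drop i) e.toList) with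
    | some e => (true, e)
    | none => pvScan emojis s (i + 1) fuel

def procura_emoji_alt (emojis : List String) (frase : String) : List String × Bool × String :=
  let r := pvScan emojis frase.toList 0 frase.toList.length
  (emojis, r.1, r.2)

-- ===== PRECONDITION & SPEC =====
def Spec_procura_emoji (emojis : List String) (frase : String) (out : List String × Bool × String) : Prop := out = procura_emoji_alt emojis frase
instance (emojis : List String) (frase : String) (out : List String × Bool × String) : Decidable (Spec_procura_emoji emojis frase out) := by unfold Spec_procura_emoji; infer_instance

-- ===== CLAIM (what is proved, stated in full; the proofs are below) =====
def Claim_equal_procura_emoji : Prop := ∀ (emojis : List String) (frase : String), Dom_procura_emoji emojis frase → Spec_procura_emoji emojis frase (procura_emoji emojis frase)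

-- ===== LEMMAS AND PROOFS =====

-- A's loop body as a named step function (on a fixed phrase char list s).
def pvStep (s : List Char) (st : Int × Bool × String) (emoji : String) : Int × Bool × String :=
  let indice := PySem.Chars.find s emoji.toList
  if indice < st.1 ∧ indice > -1 then (indice, true, emoji) else st

-- If no pattern's first occurrence is eligible, the state never changes.
theorem pvStay (s : List Char) (xs : List String) (st : Int × Bool × String)
    (h : ∀ e ∈ xs, ¬ (PySem.Chars.find s e.toList < st.1 ∧ PySem.Chars.find s e.toList > -1)) :
    xs.foldl (pvStep s) st = st := by
  induction xs with
  | nil => rfl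
  | cons e xs ih =>
    have he := h e (by simp)
    simp only [List.foldl, pvStep, if_neg he]
    exact ih (fun e' he' => h e' (by simp [he']))

-- If i is the globally least match position and e₀ the first pattern matching
-- there, A's fold from any state with menor > i ends at (i, true, e₀).
theorem pvHit (s : List Char) (xs : List String) (i : Nat) (e₀ : String)
    (st : Int × Bool × String) (hm : (i : Int) < st.1)
    (hnone : ∀ e ∈ xs, ∀ j < i, ¬ (e.toList <+: s.drop j))
    (hfind : xs.find? (fun e => PySem.Chars.startswith (s.drop i) e.toList) = some e₀) :
    xs.foldl (pvStep s) st = ((i : Int), true, e₀) := by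
  induction xs generalizing st with
  | nil => simp at hfind
  | cons e xs ih =>
    have hnone_e := hnone e (by simp)
    have hnone_tl : ∀ e' ∈ xs, ∀ j < i, ¬ (e'.toList <+: s.drop j) :=
      fun e' he' => hnone e' (by simp [he'])
    by_cases hmatch : PySem.Chars.startswith (s.drop i) e.toList = true
    · -- head matches at i: e₀ = e, find s e = i, state updates, then stays
      have he0 : e₀ = e := by
        simp only [List.find?_cons, hmatch] at hfind
        exact (Option.some_inj.mp hfind).symm
      have hpre : e.toList <+: s.drop i := (PySem.Chars.startswith_iff _ _).mp hmatch
      have hinf : e.toList <:+: s := by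
        exact (PySem.Chars.isIn_iff_infix _ _).mp ((PySem.Chars.exists_prefix_drop_iff_isIn _ _).mp ⟨i, hpre⟩)
      have hnn : 0 ≤ PySem.Chars.find s e.toList := (PySem.Chars.find_nonneg_iff _ _).mpr hinf
      have hspec := PySem.Chars.find_spec (s := s) (sub := e.toList) hnn
      -- find s e = i
      have hfi : (PySem.Chars.find s e.toList).toNat = i := by
        rcases lt_trichotomy (PySem.Chars.find s e.toList).toNat i with h | h | h
        · exact absurd hspec.1 (hnone_e _ h)
        · exact h
        · exact absurd hpre (hspec.2 i h)
      have hfi' : PySem.Chars.find s e.toList = (i : Int) := by omega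
      have hcond : PySem.Chars.find s e.toList < st.1 ∧ PySem.Chars.find s e.toList > -1 := by
        constructor <;> omega
      subst he0
      simp only [List.foldl, pvStep]
      rw [if_pos hcond, hfi']
      apply pvStay
      intro e' he' ⟨hlt, hgt⟩
      have hnn' : 0 ≤ PySem.Chars.find s e'.toList := by omega
      have hspec' := PySem.Chars.find_spec (s := s) (sub := e'.toList) hnn'
      exact hnone_tl e' he' _ (by omega) hspec'.1
    · -- head does not match at i
      simp only [List.find?_cons, hmatch] at hfind
      simp only [List.foldl, pvStep]
      split
      · next hcond =>
        -- updated state has menor = find s e > i (no match ≤ i for e)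
        obtain ⟨hlt, hgt⟩ := hcond
        have hnn : 0 ≤ PySem.Chars.find s e.toList := by omega
        have hspec := PySem.Chars.find_spec (s := s) (sub := e.toList) hnn
        have hgtI : (i : Int) < PySem.Chars.find s e.toList := by
          rcases lt_trichotomy ((PySem.Chars.find s e.toList).toNat) i with h | h | h
          · exact absurd hspec.1 (hnone_e _ h)
          · exfalso
            apply hmatch
            exact (PySem.Chars.startswith_iff _ _).mpr (h ▸ hspec.1)
          · omega
        exact ih _ hgtI hnone_tl hfind
      · exact ih _ hm hnone_tl hfind

-- Scan vs fold: starting scan at position i (fuel n - i) with no match before i.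
theorem pvMain (s : List Char) (xs : List String) (fuel i : Nat)
    (hfi : i + fuel = s.length)
    (hnone : ∀ e ∈ xs, ∀ j < i, ¬ (e.toList <+: s.drop j)) :
    (xs.foldl (pvStep s) ((s.length : Int), false, "")).2 = pvScan xs s i fuel := by
  induction fuel generalizing i with
  | zero =>
    have hst : xs.foldl (pvStep s) ((s.length : Int), false, "") = ((s.length : Int), false, "") := by
      apply pvStay
      intro e he ⟨hlt, hgt⟩
      have hnn : 0 ≤ PySem.Chars.find s e.toList := by omega
      have hspec := PySem.Chars.find_spec (s := s) (sub := e.toList) hnn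
      exact hnone e he _ (by omega) hspec.1
    rw [hst]; rfl
  | succ fuel ih =>
    rw [pvScan]
    cases hfind : xs.find? (fun e => PySem.Chars.startswith (s.drop i) e.toList) with
    | some e₀ =>
      rw [pvHit s xs i e₀ _ (by simp; omega) hnone hfind]
    | none =>
      apply ih (i + 1) (by omega)
      intro e he j hj
      by_cases hji : j < i
      · exact hnone e he j hji
      · have hji' : j = i := by omega
        subst hji'
        intro hpre
        have := List.find?_eq_none.mp hfind e he
        exact this ((PySem.Chars.startswith_iff _ _).mpr hpre)

-- ===== VERDICT (by name: the statement is the Claim_ definition above) =====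
theorem procura_emoji_spec : Claim_equal_procura_emoji := by
  intro emojis frase _
  unfold Spec_procura_emoji procura_emoji procura_emoji_alt
  have hstep : (fun (st : Int × Bool × String) emoji =>
      let indice := PySem.Str.find frase emoji
      if indice < st.1 ∧ indice > -1 then (indice, true, emoji) else st)
      = pvStep frase.toList := by
    funext st emoji
    simp [pvStep, PySem.Str.find_eq]
  rw [hstep]
  have := pvMain frase.toList emojis frase.toList.length 0 (by omega)
    (fun e _ j hj => absurd hj (by omega))
  simp only [this]
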